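-- pv_equiv track=rewrite | github.com/mushinako/Google-Code-Jam-2019 | 03-1B/01-Manhattan_Crepe_Cart/solution-PP.py | calc_axis
-- ===== SOURCE A (Python) =====
-- from bisect import bisect_left, bisect_right
--
-- def calc_axis(grid_len, ppl_d, ppl_u):
--     ppl_d.sort()
--     ppl_u.sort()
--     # Candidates are 0 or ppl_u+1
--     cand = sorted(set((0,)) | set(map(lambda x: x + 1, set(ppl_u))))
--     cur = cur_ppl = 0
--     for c in cand:
--         c_ppl = bisect_left(ppl_u, c) - bisect_right(ppl_d, c) + len(ppl_d)
--         if c_ppl > cur_ppl: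
--             cur = c
--             cur_ppl = c_ppl
--     return cur
-- ===== SOURCE B (Python) =====
-- def calc_axis(grid_len, ppl_d, ppl_u):
--     ppl_d.sort()
--     ppl_u.sort()
--     cands = sorted({0} | {u + 1 for u in ppl_u})
--     best_pos = best_cnt = 0
--     cnt = len(ppl_d)
--     i = j = 0
--     n_u = len(ppl_u)
--     n_d = len(ppl_d)
--     for c in cands:
--         while i < n_u and ppl_u[i] < c:
--             i += 1
--             cnt += 1
--         while j < n_d and ppl_d[j] <= c:
--             j += 1
--             cnt -= 1
--         if cnt > best_cnt:
--             best_pos = c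
--             best_cnt = cnt
--     return best_pos
-- ===== Notes on version B (the rewrite author's own statement) =====
-- stated objective: alternative
-- what changed: Replaces A's per-candidate bisect_left/bisect_right binary searches with a single merge-style sweep over the sorted candidates, maintaining a running people count via two monotone pointers into the sorted up/down lists.
import Mathlib
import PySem

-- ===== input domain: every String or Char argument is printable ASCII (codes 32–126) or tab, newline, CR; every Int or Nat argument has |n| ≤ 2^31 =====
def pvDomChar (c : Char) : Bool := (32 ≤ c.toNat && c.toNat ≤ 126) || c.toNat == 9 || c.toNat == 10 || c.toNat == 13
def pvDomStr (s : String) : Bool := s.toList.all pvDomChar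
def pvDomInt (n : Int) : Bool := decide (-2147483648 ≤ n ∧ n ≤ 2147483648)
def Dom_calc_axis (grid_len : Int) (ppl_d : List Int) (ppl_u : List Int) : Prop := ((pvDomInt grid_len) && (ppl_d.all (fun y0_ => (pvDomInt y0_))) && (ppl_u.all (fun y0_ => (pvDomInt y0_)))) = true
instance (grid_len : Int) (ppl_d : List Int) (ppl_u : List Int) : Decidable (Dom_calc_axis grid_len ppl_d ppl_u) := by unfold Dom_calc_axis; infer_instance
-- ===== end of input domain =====

-- B replaces A's per-candidate binary searches by one linear merge-style sweep with two
-- running pointers (objective: alternative, same O(n log n) total cost, simpler per-candidate work).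
-- NOTE: both Pythons sort ppl_d and ppl_u IN PLACE; the equivalence proved here is about the
-- return value only (the mutation is identical in A and B anyway).

-- ===== PORT A =====
def calc_axis (grid_len : Int) (ppl_d : List Int) (ppl_u : List Int) : Int :=
  let d := PySem.List.sorted ppl_d (fun x => x)
  let u := PySem.List.sorted ppl_u (fun x => x)
  -- cand = sorted(set((0,)) | set(map(lambda x: x + 1, set(ppl_u))))
  let cand := PySem.List.sorted
      (PySem.Set.union (PySem.Set.ofList [(0 : Int)])
        (PySem.Set.ofList ((PySem.Set.ofList ppl_u).map (fun x => x + 1))))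
      (fun x => x)
  (cand.foldl
    (fun (st : Int × Int) c =>
      let c_ppl : Int :=
        (PySem.List.bisectLeft u c : Int) - (PySem.List.bisectRight d c : Int) + (d.length : Int)
      if c_ppl > st.2 then (c, c_ppl) else st)
    (0, 0)).1

-- ===== PORT B =====
-- while i < n_u and ppl_u[i] < c: i += 1; cnt += 1
def calcAltAdvU (u : List Int) (c : Int) (i : Nat) (cnt : Int) : Nat × Int :=
  if h : i < u.length then
    if u[i] < c then calcAltAdvU u c (i + 1) (cnt + 1) else (i, cnt)
  else (i, cnt)
termination_by u.length - i
decreasing_by omega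

-- while j < n_d and ppl_d[j] <= c: j += 1; cnt -= 1
def calcAltAdvD (d : List Int) (c : Int) (j : Nat) (cnt : Int) : Nat × Int :=
  if h : j < d.length then
    if d[j] ≤ c then calcAltAdvD d c (j + 1) (cnt - 1) else (j, cnt)
  else (j, cnt)
termination_by d.length - j
decreasing_by omega

def calc_axis_alt (grid_len : Int) (ppl_d : List Int) (ppl_u : List Int) : Int :=
  let d := PySem.List.sorted ppl_d (fun x => x)
  let u := PySem.List.sorted ppl_u (fun x => x)
  -- cands = sorted({0} | {u + 1 for u in ppl_u})
  let cands := PySem.List.sorted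
      (PySem.Set.union (PySem.Set.ofList [(0 : Int)]) (ppl_u.map (fun x => x + 1)))
      (fun x => x)
  -- state = (best_pos, best_cnt, i, j, cnt)
  (cands.foldl
    (fun (st : Int × Int × Nat × Nat × Int) c =>
      let r1 := calcAltAdvU u c st.2.2.1 st.2.2.2.2
      let r2 := calcAltAdvD d c st.2.2.2.1 r1.2
      if r2.2 > st.2.1 then (c, r2.2, r1.1, r2.1, r2.2) else (st.1, st.2.1, r1.1, r2.1, r2.2))
    (0, 0, 0, 0, (d.length : Int))).1

-- ===== PRECONDITION & SPEC =====
def Spec_calc_axis (grid_len : Int) (ppl_d : List Int) (ppl_u : List Int) (out : Int) : Prop := out = calc_axis_alt grid_len ppl_d ppl_u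
instance (grid_len : Int) (ppl_d : List Int) (ppl_u : List Int) (out : Int) : Decidable (Spec_calc_axis grid_len ppl_d ppl_u out) := by unfold Spec_calc_axis; infer_instance

-- ===== CLAIM (what is proved, stated in full; the proofs are below) =====
def Claim_equal_calc_axis : Prop := ∀ (grid_len : Int) (ppl_d : List Int) (ppl_u : List Int), Dom_calc_axis grid_len ppl_d ppl_u → Spec_calc_axis grid_len ppl_d ppl_u (calc_axis grid_len ppl_d ppl_u)

-- ===== LEMMAS AND PROOFS =====

-- a list split into a prefix satisfying p and a suffix refuting p has countP p = the split point
lemma countP_eq_of_split (p : Int → Bool) : ∀ (xs : List Int) (k : Nat),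
    k ≤ xs.length →
    (∀ j (hj : j < xs.length), j < k → p xs[j]) →
    (∀ j (hj : j < xs.length), k ≤ j → ¬ p xs[j]) →
    xs.countP p = k
  | [], k, hk, _, _ => by simp at hk ⊢; omega
  | x :: t, 0, _, _, h2 => by
      apply List.countP_eq_zero.mpr
      intro a ha
      obtain ⟨j, hj, he⟩ := List.getElem_of_mem ha
      have := h2 j hj (Nat.zero_le _)
      rw [he] at this
      simpa using this
  | x :: t, k + 1, hk, h1, h2 => by
      have hx : p x = true := by simpa using h1 0 (by simp) (Nat.succ_pos k)
      have ht : t.countP p = k :=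
        countP_eq_of_split p t k (by simpa using hk)
          (fun j hj hjk => by simpa using h1 (j + 1) (by simpa using hj) (by omega))
          (fun j hj hjk => by simpa using h2 (j + 1) (by simpa using hj) (by omega))
      simp [hx, ht]

lemma bisectLeft_eq_countP (xs : List Int) (c : Int) (hs : xs.Pairwise (· ≤ ·)) :
    PySem.List.bisectLeft xs c = xs.countP (fun x => decide (x < c)) := by
  obtain ⟨hle, h1, h2⟩ := PySem.List.bisectLeft_spec xs c hs
  exact (countP_eq_of_split _ xs _ hle
    (fun j hj hjk => by simpa using h1 j hj hjk)
    (fun j hj hjk => by simpa using not_lt.mpr (h2 j hj hjk))).symm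

lemma bisectRight_eq_countP (xs : List Int) (c : Int) (hs : xs.Pairwise (· ≤ ·)) :
    PySem.List.bisectRight xs c = xs.countP (fun x => decide (x ≤ c)) := by
  obtain ⟨hle, h1, h2⟩ := PySem.List.bisectRight_spec xs c hs
  exact (countP_eq_of_split _ xs _ hle
    (fun j hj hjk => by simpa using h1 j hj hjk)
    (fun j hj hjk => by simpa using not_le.mpr (h2 j hj hjk))).symm

lemma prefix_lt_of_countP (xs : List Int) (c : Int) (hs : xs.Pairwise (· ≤ ·)) :
    ∀ j (hj : j < xs.length), j < xs.countP (fun x => decide (x < c)) → xs[j] < c := by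
  obtain ⟨hle, h1, _⟩ := PySem.List.bisectLeft_spec xs c hs
  rw [bisectLeft_eq_countP xs c hs] at h1
  exact h1

lemma prefix_le_of_countP (xs : List Int) (c : Int) (hs : xs.Pairwise (· ≤ ·)) :
    ∀ j (hj : j < xs.length), j < xs.countP (fun x => decide (x ≤ c)) → xs[j] ≤ c := by
  obtain ⟨hle, h1, _⟩ := PySem.List.bisectRight_spec xs c hs
  rw [bisectRight_eq_countP xs c hs] at h1
  exact h1

lemma calcAltAdvU_eq (u : List Int) (c : Int) (hs : u.Pairwise (· ≤ ·)) :
    ∀ (i : Nat) (cnt : Int), i ≤ u.length →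
    (∀ j (hj : j < u.length), j < i → u[j] < c) →
    calcAltAdvU u c i cnt =
      (u.countP (fun x => decide (x < c)),
       cnt + (u.countP (fun x => decide (x < c)) : Int) - i) := by
  intro i cnt
  fun_induction calcAltAdvU u c i cnt with
  | case1 i cnt h hcmp ih =>
      intro hle hlt
      rw [ih (by omega)
        (fun j hj hji => by rcases Nat.lt_or_ge j i with h' | h'
                            · exact hlt j hj h'
                            · have : j = i := by omega
                              subst this; exact hcmp)]
      refine Prod.ext rfl ?_
      push_cast; ring
  | case2 i cnt h hcmp =>
      intro hle hlt
      have hk : u.countP (fun x => decide (x < c)) = i := by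
        apply countP_eq_of_split _ u i hle (fun j hj hji => by simpa using hlt j hj hji)
        intro j hj hij
        have : u[i] ≤ u[j] := by
          rcases Nat.eq_or_lt_of_le hij with rfl | hij'
          · exact le_refl _
          · exact (List.pairwise_iff_getElem.mp hs) i j h hj hij'
        simp only [decide_eq_true_eq]
        omega
      rw [hk]
      refine Prod.ext rfl ?_
      push_cast; ring
  | case3 i cnt h =>
      intro hle hlt
      have hi : i = u.length := by omega
      have hk : u.countP (fun x => decide (x < c)) = i := by
        apply countP_eq_of_split _ u i hle (fun j hj hji => by simpa using hlt j hj hji)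
        intro j hj hij
        omega
      rw [hk]
      refine Prod.ext rfl ?_
      push_cast; ring

lemma calcAltAdvD_eq (d : List Int) (c : Int) (hs : d.Pairwise (· ≤ ·)) :
    ∀ (j : Nat) (cnt : Int), j ≤ d.length →
    (∀ k (hk : k < d.length), k < j → d[k] ≤ c) →
    calcAltAdvD d c j cnt =
      (d.countP (fun x => decide (x ≤ c)),
       cnt + (j : Int) - (d.countP (fun x => decide (x ≤ c)) : Int)) := by
  intro j cnt
  fun_induction calcAltAdvD d c j cnt with
  | case1 j cnt h hcmp ih =>
      intro hle hlt
      rw [ih (by omega)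
        (fun k hk hkj => by rcases Nat.lt_or_ge k j with h' | h'
                            · exact hlt k hk h'
                            · have : k = j := by omega
                              subst this; exact hcmp)]
      refine Prod.ext rfl ?_
      push_cast; ring
  | case2 j cnt h hcmp =>
      intro hle hlt
      have hk : d.countP (fun x => decide (x ≤ c)) = j := by
        apply countP_eq_of_split _ d j hle (fun k hk hkj => by simpa using hlt k hk hkj)
        intro k hk hjk
        have : d[j] ≤ d[k] := by
          rcases Nat.eq_or_lt_of_le hjk with rfl | hjk'
          · exact le_refl _
          · exact (List.pairwise_iff_getElem.mp hs) j k h hk hjk'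
        simp only [decide_eq_true_eq]
        omega
      rw [hk]
      refine Prod.ext rfl ?_
      push_cast; ring
  | case3 j cnt h =>
      intro hle hlt
      have hk : d.countP (fun x => decide (x ≤ c)) = j := by
        apply countP_eq_of_split _ d j hle (fun k hk hkj => by simpa using hlt k hk hkj)
        intro k hk hjk
        omega
      rw [hk]
      refine Prod.ext rfl ?_
      push_cast; ring

lemma sweep_eq (u d : List Int) (hu : u.Pairwise (· ≤ ·)) (hd : d.Pairwise (· ≤ ·)) :
    ∀ (cs : List Int), cs.Pairwise (· < ·) →
    ∀ (i j : Nat) (cnt bp bc : Int),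
    i ≤ u.length → j ≤ d.length →
    (∀ c ∈ cs, ∀ k (hk : k < u.length), k < i → u[k] < c) →
    (∀ c ∈ cs, ∀ k (hk : k < d.length), k < j → d[k] ≤ c) →
    cnt = (i : Int) + (d.length : Int) - (j : Int) →
    (cs.foldl
      (fun (st : Int × Int × Nat × Nat × Int) c =>
        let r1 := calcAltAdvU u c st.2.2.1 st.2.2.2.2
        let r2 := calcAltAdvD d c st.2.2.2.1 r1.2
        if r2.2 > st.2.1 then (c, r2.2, r1.1, r2.1, r2.2) else (st.1, st.2.1, r1.1, r2.1, r2.2))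
      (bp, bc, i, j, cnt)).1 =
    (cs.foldl
      (fun (st : Int × Int) c =>
        let c_ppl : Int :=
          (PySem.List.bisectLeft u c : Int) - (PySem.List.bisectRight d c : Int) + (d.length : Int)
        if c_ppl > st.2 then (c, c_ppl) else st)
      (bp, bc)).1 := by
  intro cs
  induction cs with
  | nil => intro _ i j cnt bp bc _ _ _ _ _; simp
  | cons c cs ih =>
      intro hpw i j cnt bp bc hile hjle hiu hjd hcnt
      have hpw' := (List.pairwise_cons.mp hpw).2
      have hcc : ∀ c' ∈ cs, c < c' := (List.pairwise_cons.mp hpw).1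
      simp only [List.foldl_cons]
      rw [calcAltAdvU_eq u c hu i cnt hile (fun k hk hki => hiu c (by simp) k hk hki),
          calcAltAdvD_eq d c hd j _ hjle (fun k hk hkj => hjd c (by simp) k hk hkj)]
      set Ku := u.countP (fun x => decide (x < c)) with hKu
      set Kd := d.countP (fun x => decide (x ≤ c)) with hKd
      have hKule : Ku ≤ u.length := List.countP_le_length
      have hKdle : Kd ≤ d.length := List.countP_le_length
      have hcval : cnt + (Ku : Int) - (i : Int) + (j : Int) - (Kd : Int)
          = (PySem.List.bisectLeft u c : Int) - (PySem.List.bisectRight d c : Int) + (d.length : Int) := by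
        rw [bisectLeft_eq_countP u c hu, bisectRight_eq_countP d c hd, ← hKu, ← hKd]
        omega
      have hiu' : ∀ c' ∈ cs, ∀ k (hk : k < u.length), k < Ku → u[k] < c' :=
        fun c' hc' k hk hkK =>
          lt_trans (prefix_lt_of_countP u c hu k hk hkK) (hcc c' hc')
      have hjd' : ∀ c' ∈ cs, ∀ k (hk : k < d.length), k < Kd → d[k] ≤ c' :=
        fun c' hc' k hk hkK =>
          le_of_lt (lt_of_le_of_lt (prefix_le_of_countP d c hd k hk hkK) (hcc c' hc'))
      simp only [hcval]
      by_cases hgt : (PySem.List.bisectLeft u c : Int) - (PySem.List.bisectRight d c : Int) + (d.length : Int) > bc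
      · simp only [hgt, if_pos]
        rw [← hcval]
        exact ih hpw' Ku Kd _ c _ hKule hKdle hiu' hjd' (by omega)
      · simp only [hgt, if_false]
        rw [← hcval]
        exact ih hpw' Ku Kd _ bp bc hKule hKdle hiu' hjd' (by omega)

-- the two candidate lists (A's and B's) are the same list
lemma cands_eq (ppl_u : List Int) :
    PySem.List.sorted
      (PySem.Set.union (PySem.Set.ofList [(0 : Int)])
        (PySem.Set.ofList ((PySem.Set.ofList ppl_u).map (fun x => x + 1))))
      (fun x => x) =
    PySem.List.sorted
      (PySem.Set.union (PySem.Set.ofList [(0 : Int)]) (ppl_u.map (fun x => x + 1)))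
      (fun x => x) := by
  apply PySem.List.sorted_eq_sorted_of_perm _ _ _ (fun a b h => h)
  apply (List.perm_ext_iff_of_nodup
    (PySem.Set.nodup_union _ _ (PySem.Set.nodup_ofList _))
    (PySem.Set.nodup_union _ _ (PySem.Set.nodup_ofList _))).mpr
  intro a
  simp [PySem.Set.mem_union, PySem.Set.mem_ofList, List.mem_map]

lemma sorted_nodup_pairwise_lt (s : List Int) (hn : s.Nodup) :
    (PySem.List.sorted s (fun x => x)).Pairwise (· < ·) := by
  have h1 : (PySem.List.sorted s (fun x => x)).Pairwise (· ≤ ·) := by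
    simpa using PySem.List.sorted_pairwise s (fun x => x)
  have h2 : (PySem.List.sorted s (fun x => x)).Nodup :=
    (PySem.List.sorted_perm s (fun x => x) false).symm.nodup hn
  exact (h1.and h2).imp (fun ⟨hle, hne⟩ => lt_of_le_of_ne hle hne)

-- ===== VERDICT (by name: the statement is the Claim_ definition above) =====
theorem calc_axis_spec : Claim_equal_calc_axis := by
  unfold Claim_equal_calc_axis
  intro grid_len ppl_d ppl_u _
  unfold Spec_calc_axis calc_axis calc_axis_alt
  rw [cands_eq]
  have hu : (PySem.List.sorted ppl_u (fun x => x)).Pairwise (· ≤ ·) := by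
    simpa using PySem.List.sorted_pairwise ppl_u (fun x => x)
  have hd : (PySem.List.sorted ppl_d (fun x => x)).Pairwise (· ≤ ·) := by
    simpa using PySem.List.sorted_pairwise ppl_d (fun x => x)
  have hcs : (PySem.List.sorted
      (PySem.Set.union (PySem.Set.ofList [(0 : Int)]) (ppl_u.map (fun x => x + 1)))
      (fun x => x)).Pairwise (· < ·) :=
    sorted_nodup_pairwise_lt _ (PySem.Set.nodup_union _ _ (PySem.Set.nodup_ofList _))
  exact (sweep_eq _ _ hu hd _ hcs 0 0 _ 0 0 (Nat.zero_le _) (Nat.zero_le _)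
    (fun _ _ _ _ h => absurd h (Nat.not_lt_zero _))
    (fun _ _ _ _ h => absurd h (Nat.not_lt_zero _)) (by simp)).symm
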